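-- pv_equiv track=rewrite | github.com/sandeepkumar8713/pythonapps | 06_recursion/04_special_keyboard.py | findOptimal
-- ===== SOURCE A (Python) =====
-- def findOptimal(N):
--     if N < 7:
--         return N
--
--     screen = [0] * N
--
--     for n in range(1, 7, 1):
--         screen[n-1] = n
--
--     for n in range(7, N+1, 1):
--         screen[n-1] = 0
--         # find b, for which no. of A's is optimal
--         for b in range(n-3, 0, -1):
--             curr = (n-b-1) * screen[b-1]
--             if curr > screen[n-1]:
--                 # use this for backtrace
--                 # print b, screen[b-1], n, curr
--                 screen[n-1] = curr
--
--     return screen[N-1]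
-- ===== SOURCE B (Python) =====
-- def findOptimal(N):
--     if N < 7:
--         return N
--     # f(n) = max characters with n presses; for n >= 7 the optimal last
--     # "select-all, copy, paste..." block multiplies by 3 or 4, so only the
--     # break points b = n-4 and b = n-5 matter: f(n) = max(3*f(n-4), 4*f(n-5)).
--     # Keep a sliding window of the last five values f(n-5) .. f(n-1).
--     a, b, c, d, e = 2, 3, 4, 5, 6
--     for _ in range(7, N + 1):
--         a, b, c, d, e = b, c, d, e, max(3 * b, 4 * a)
--     return e
-- ===== Notes on version B (the rewrite author's own statement) =====
-- stated objective: faster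
-- what changed: Replaced the quadratic DP that rescans every break point for each key count by a linear sliding-window recurrence keeping only the last five values, taking the better of tripling the value from four presses back or quadrupling the value from five presses back (proved in Lean that no other break point can beat these two).
import Mathlib
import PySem

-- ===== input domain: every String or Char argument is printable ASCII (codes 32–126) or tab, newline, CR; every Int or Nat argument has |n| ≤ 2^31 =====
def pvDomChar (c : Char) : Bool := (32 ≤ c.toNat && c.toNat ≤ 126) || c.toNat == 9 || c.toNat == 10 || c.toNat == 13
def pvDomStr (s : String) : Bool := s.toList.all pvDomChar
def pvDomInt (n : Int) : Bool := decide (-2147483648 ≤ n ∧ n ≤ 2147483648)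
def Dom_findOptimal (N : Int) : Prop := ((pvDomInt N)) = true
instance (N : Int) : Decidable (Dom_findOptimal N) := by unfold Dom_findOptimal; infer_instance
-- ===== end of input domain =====

-- B replaces A's O(N^2) scan of all break points by the O(N) sliding-window recurrence
-- f(n) = max(3*f(n-4), 4*f(n-5)); the proof shows only those two break points can be optimal.


-- ===== PORT A =====
-- Literal port of A; every screen index used (n-1, b-1, N-1) is in range, so the total
-- forms pyGetD/pySetD are exact here.
def findOptimal (N : Int) : Int :=
  if N < 7 then N
  else
    let screen := List.replicate N.toNat (0 : Int)
    let screen := (PySem.List.pyRange 1 7 1).foldl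
      (fun s n => PySem.List.pySetD s (n - 1) n) screen
    let screen := (PySem.List.pyRange 7 (N + 1) 1).foldl
      (fun s n =>
        let s := PySem.List.pySetD s (n - 1) 0
        (PySem.List.pyRange (n - 3) 0 (-1)).foldl
          (fun s b =>
            let curr := (n - b - 1) * PySem.List.pyGetD s (b - 1) 0
            if curr > PySem.List.pyGetD s (n - 1) 0 then PySem.List.pySetD s (n - 1) curr
            else s)
          s)
      screen
    PySem.List.pyGetD screen (N - 1) 0

-- ===== PORT B =====
-- Port of B: five rotating variables (a,b,c,d,e) = (f(n-5),…,f(n-1)).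
def findOptimal_alt (N : Int) : Int :=
  if N < 7 then N
  else
    let st := (PySem.List.pyRange 7 (N + 1) 1).foldl
      (fun (s : Int × Int × Int × Int × Int) _ =>
        (s.2.1, s.2.2.1, s.2.2.2.1, s.2.2.2.2, max (3 * s.2.1) (4 * s.1)))
      ((2 : Int), (3 : Int), (4 : Int), (5 : Int), (6 : Int))
    st.2.2.2.2

-- ===== PRECONDITION & SPEC =====
def Spec_findOptimal (N : Int) (out : Int) : Prop := out = findOptimal_alt N
instance (N : Int) (out : Int) : Decidable (Spec_findOptimal N out) := by unfold Spec_findOptimal; infer_instance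

-- ===== CLAIM (what is proved, stated in full; the proofs are below) =====
def Claim_equal_findOptimal : Prop := ∀ (N : Int), Dom_findOptimal N → Spec_findOptimal N (findOptimal N)

-- ===== LEMMAS AND PROOFS =====

-- The mathematical value: Ftab n = [F n, F (n-1), …, F 0] built structurally (kernel-reducible),
-- F n = max characters for n presses.
def Ftab : Nat → List Int
  | 0 => [0]
  | n+1 => (if n+1 < 7 then ((n : Int)+1)
            else max (3 * (Ftab n).getD 3 0) (4 * (Ftab n).getD 4 0)) :: Ftab n

def F (n : Nat) : Int := (Ftab n).headD 0

theorem Ftab_cons (n : Nat) : Ftab (n+1) = F (n+1) :: Ftab n := rfl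

theorem Ftab_getD : ∀ (k n : Nat), k ≤ n → (Ftab n).getD k 0 = F (n - k) := by
  intro k
  induction k with
  | zero =>
    intro n _
    cases n with
    | zero => rfl
    | succ m => rw [Ftab_cons]; rfl
  | succ k ih =>
    intro n hk
    obtain ⟨m, rfl⟩ : ∃ m, n = m + 1 := ⟨n - 1, by omega⟩
    rw [Ftab_cons, List.getD_cons_succ]
    have h := ih m (by omega)
    rwa [show m - k = m + 1 - (k+1) by omega] at h

theorem F_lt (n : Nat) (h : n < 7) : F n = n := by
  interval_cases n <;> rfl

theorem F_rec (n : Nat) (h : 7 ≤ n) : F n = max (3 * F (n-4)) (4 * F (n-5)) := by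
  obtain ⟨m, rfl⟩ : ∃ m, n = m + 1 := ⟨n - 1, by omega⟩
  have h1 : F (m+1) = max (3 * (Ftab m).getD 3 0) (4 * (Ftab m).getD 4 0) := by
    have : ¬ (m + 1 < 7) := by omega
    simp [F, Ftab, this]
  rw [h1, Ftab_getD 3 m (by omega), Ftab_getD 4 m (by omega),
      show m - 3 = m + 1 - 4 by omega, show m - 4 = m + 1 - 5 by omega]

theorem F_ge (n : Nat) : (n : Int) ≤ F n := by
  induction n using Nat.strong_induction_on with
  | _ n ih =>
    by_cases h : n < 7
    · rw [F_lt n h]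
    · push_neg at h
      rw [F_rec n h]
      have h4 := ih (n-4) (by omega)
      have : ((n-4 : Nat) : Int) = (n : Int) - 4 := by omega
      rw [this] at h4
      have : (n : Int) ≤ 3 * F (n-4) := by linarith [show (7:Int) ≤ (n:Int) by exact_mod_cast h]
      exact le_trans this (le_max_left _ _)

theorem F_nonneg (n : Nat) : 0 ≤ F n := le_trans (by positivity) (F_ge n)

-- Periodicity: from n = 16 on, F n = 4 * F (n-5).
theorem F_Q (n : Nat) (h : 16 ≤ n) : F n = 4 * F (n-5) := by
  induction n using Nat.strong_induction_on with
  | _ n ih =>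
    by_cases hs : n < 21
    · interval_cases n <;> decide
    · push_neg at hs
      have h4 := ih (n-4) (by omega) (by omega)
      rw [show n - 4 - 5 = n - 5 - 4 by omega] at h4
      rw [F_rec n (by omega), h4, F_rec (n-5) (by omega)]
      simp only [max_def]
      split_ifs <;> omega

theorem F_L2 (k : Nat) (h : 3 ≤ k) : 2 * F (k+1) ≤ 3 * F k := by
  induction k using Nat.strong_induction_on with
  | _ k ih =>
    by_cases hs : k < 16
    · interval_cases k <;> decide
    · push_neg at hs
      have q1 := F_Q (k+1) (by omega)
      have q2 := F_Q k (by omega)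
      have e1 : k + 1 - 5 = (k - 5) + 1 := by omega
      rw [q1, q2, e1]
      have := ih (k-5) (by omega) (by omega)
      linarith

theorem F_L5 (k : Nat) (h : 6 ≤ k) : 5 * F k ≤ 4 * F (k+1) := by
  induction k using Nat.strong_induction_on with
  | _ k ih =>
    by_cases hs : k < 16
    · interval_cases k <;> decide
    · push_neg at hs
      have q1 := F_Q (k+1) (by omega)
      have q2 := F_Q k (by omega)
      have e1 : k + 1 - 5 = (k - 5) + 1 := by omega
      rw [q1, q2, e1]
      have := ih (k-5) (by omega) (by omega)
      linarith

theorem F_L6 (k : Nat) : 3 * F k ≤ 2 * F (k+2) := by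
  induction k using Nat.strong_induction_on with
  | _ k ih =>
    by_cases hs : k < 16
    · interval_cases k <;> decide
    · push_neg at hs
      have q1 := F_Q (k+2) (by omega)
      have q2 := F_Q k (by omega)
      have e1 : k + 2 - 5 = (k - 5) + 2 := by omega
      rw [q1, q2, e1]
      have := ih (k-5) (by omega)
      linarith

-- Main bound: for n ≥ 7 every break point b ∈ [1, n-3] satisfies (n-b-1)·F b ≤ F n.
theorem F_main (n : Nat) (hn : 7 ≤ n) (b : Nat) (hb1 : 1 ≤ b) (hb2 : b ≤ n - 3) :
    ((n : Int) - b - 1) * F b ≤ F n := by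
  induction n using Nat.strong_induction_on generalizing b with
  | _ n ih =>
    by_cases hs : n < 21
    · interval_cases n <;> interval_cases b <;> decide
    · push_neg at hs
      have hrec := F_rec n (by omega)
      by_cases h2 : b = n - 3
      · subst h2
        have hL2 := F_L2 (n-4) (by omega)
        have e : n - 4 + 1 = n - 3 := by omega
        rw [e] at hL2
        have : ((n:Int) - (n-3:Nat) - 1) = 2 := by omega
        rw [this]
        calc 2 * F (n-3) ≤ 3 * F (n-4) := hL2
          _ ≤ F n := hrec ▸ le_max_left _ _
      by_cases h3 : b = n - 4
      · subst h3
        have : ((n:Int) - (n-4:Nat) - 1) = 3 := by omega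
        rw [this]
        exact hrec ▸ le_max_left _ _
      by_cases h4 : b = n - 5
      · subst h4
        have : ((n:Int) - (n-5:Nat) - 1) = 4 := by omega
        rw [this]
        exact hrec ▸ le_max_right _ _
      by_cases h5 : b = n - 6
      · subst h5
        have hL5 := F_L5 (n-6) (by omega)
        have e : n - 6 + 1 = n - 5 := by omega
        rw [e] at hL5
        have : ((n:Int) - (n-6:Nat) - 1) = 5 := by omega
        rw [this]
        calc 5 * F (n-6) ≤ 4 * F (n-5) := hL5
          _ ≤ F n := hrec ▸ le_max_right _ _
      by_cases h6 : b = n - 7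
      · subst h6
        have hL6 := F_L6 (n-7)
        have e : n - 7 + 2 = n - 5 := by omega
        rw [e] at hL6
        have : ((n:Int) - (n-7:Nat) - 1) = 6 := by omega
        rw [this]
        calc 6 * F (n-7) ≤ 4 * F (n-5) := by linarith
          _ ≤ F n := hrec ▸ le_max_right _ _
      · -- b ≤ n - 8 : reduce to n - 5 and scale by 4
        have hb8 : b ≤ n - 8 := by omega
        have hIH := ih (n-5) (by omega) (by omega) b hb1 (by omega)
        have hF := F_nonneg b
        have hco : ((n:Int) - b - 1) ≤ 4 * ((n:Int) - 5 - b - 1) := by omega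
        have hq := F_Q n (by omega)
        have e : ((n - 5 : Nat) : Int) = (n : Int) - 5 := by omega
        rw [e] at hIH
        calc ((n:Int) - b - 1) * F b ≤ (4 * ((n:Int) - 5 - b - 1)) * F b :=
              mul_le_mul_of_nonneg_right hco hF
          _ = 4 * (((n:Int) - 5 - b - 1) * F b) := by ring
          _ ≤ 4 * F (n-5) := by linarith
          _ = F n := hq.symm

-- ---- B side ----

theorem B_loop (m : Int) (hm : 6 ≤ m) :
    (PySem.List.pyRange 7 (m+1) 1).foldl
      (fun (s : Int × Int × Int × Int × Int) _ =>
        (s.2.1, s.2.2.1, s.2.2.2.1, s.2.2.2.2, max (3 * s.2.1) (4 * s.1)))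
      ((2 : Int), (3 : Int), (4 : Int), (5 : Int), (6 : Int))
    = (F (m.toNat - 4), F (m.toNat - 3), F (m.toNat - 2), F (m.toNat - 1), F m.toNat) := by
  induction m, hm using Int.le_induction with
  | base => rw [PySem.List.pyRange_one_eq_nil (by omega)]; decide
  | succ n hn ih =>
    rw [show n + 1 + 1 = (n + 1) + 1 from rfl,
        PySem.List.pyRange_one_succ_right (by omega), List.foldl_append, ih]
    simp only [List.foldl_cons, List.foldl_nil]
    have ht : (n + 1).toNat = n.toNat + 1 := by omega
    have hrec := F_rec (n.toNat + 1) (by omega)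
    rw [show n.toNat + 1 - 4 = n.toNat - 3 by omega,
        show n.toNat + 1 - 5 = n.toNat - 4 by omega] at hrec
    rw [ht, show n.toNat + 1 - 4 = n.toNat - 3 by omega,
        show n.toNat + 1 - 3 = n.toNat - 2 by omega,
        show n.toNat + 1 - 2 = n.toNat - 1 by omega,
        show n.toNat + 1 - 1 = n.toNat by omega, hrec]

theorem B_eq_F (N : Int) (h : ¬ N < 7) : findOptimal_alt N = F N.toNat := by
  unfold findOptimal_alt
  rw [if_neg h, B_loop N (by omega)]

-- ---- A side ----

def mkScreen (L m : Nat) : List Int :=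
  (List.range L).map (fun i => if i < m then F (i+1) else 0)

theorem mkScreen_length (L m : Nat) : (mkScreen L m).length = L := by simp [mkScreen]

theorem pyGetD_mkScreen (L m : Nat) (i : Int) (h0 : 0 ≤ i) (h : i < (L : Int)) :
    PySem.List.pyGetD (mkScreen L m) i 0 = if i.toNat < m then F (i.toNat + 1) else 0 := by
  rw [PySem.List.pyGetD_eq_getElem _ _ h0 (by rw [mkScreen_length]; exact h)]
  simp only [mkScreen, List.getElem_map, List.getElem_range]

theorem pySetD_mkScreen_zero (L m : Nat) (i : Int) (hi : i.toNat = m - 1) (_hm : 1 ≤ m) (h0 : 0 ≤ i) :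
    PySem.List.pySetD (mkScreen L (m-1)) i 0 = mkScreen L (m-1) := by
  rw [PySem.List.pySetD_of_nonneg _ _ h0]
  apply List.ext_getElem (by simp [mkScreen])
  intro j hj1 hj2
  rw [List.getElem_set]
  split_ifs with hij
  · simp only [mkScreen, List.getElem_map, List.getElem_range]
    rw [if_neg (by omega)]
  · rfl

theorem pySetD_mkScreen_succ (L m : Nat) (i : Int) (hi : i.toNat = m - 1) (_hm : 1 ≤ m)
    (h0 : 0 ≤ i) (_hL : m ≤ L) :
    PySem.List.pySetD (mkScreen L (m-1)) i (F m) = mkScreen L m := by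
  rw [PySem.List.pySetD_of_nonneg _ _ h0]
  apply List.ext_getElem (by simp [mkScreen])
  intro j hj1 hj2
  rw [List.getElem_set]
  simp only [mkScreen, List.getElem_map, List.getElem_range]
  by_cases h1 : i.toNat = j
  · rw [if_pos h1, if_pos (by omega), show j + 1 = m by omega]
  · rw [if_neg h1]
    by_cases h2 : j < m - 1
    · rw [if_pos h2, if_pos (by omega)]
    · rw [if_neg h2, if_neg (by omega)]

-- generic upper bound for the running-max loop
theorem foldl_max_le (f : Int → Int) (c : Int) :
    ∀ (l : List Int) (a : Int), a ≤ c → (∀ x ∈ l, f x ≤ c) →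
    l.foldl (fun acc x => max acc (f x)) a ≤ c := by
  intro l
  induction l with
  | nil => exact fun a ha _ => ha
  | cons x xs ih =>
    intro a ha h
    exact ih _ (max_le ha (h x List.mem_cons_self)) (fun y hy => h y (List.mem_cons_of_mem _ hy))

-- The inner loop only writes index n-1; it computes the running max of the candidates.
theorem inner_fold (n : Int) (hn : 7 ≤ n) :
    ∀ (bs : List Int) (s : List Int), (n-1).toNat < s.length →
    (∀ b ∈ bs, 1 ≤ b ∧ b ≤ n - 3) →
    bs.foldl (fun s b =>
        let curr := (n - b - 1) * PySem.List.pyGetD s (b - 1) 0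
        if curr > PySem.List.pyGetD s (n - 1) 0 then PySem.List.pySetD s (n - 1) curr
        else s) s
    = PySem.List.pySetD s (n-1)
        (bs.foldl (fun acc b => max acc ((n - b - 1) * PySem.List.pyGetD s (b - 1) 0))
                  (PySem.List.pyGetD s (n-1) 0)) := by
  intro bs
  induction bs with
  | nil =>
    intro s hlen _
    simp only [List.foldl_nil]
    rw [PySem.List.pySetD_of_nonneg _ _ (by omega),
        PySem.List.pyGetD_eq_getElem _ _ (by omega) (by omega)]
    exact (List.set_getElem_self hlen).symm
  | cons b bs ih =>
    intro s hlen hmem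
    obtain ⟨hb1, hb2⟩ := hmem b List.mem_cons_self
    simp only [List.foldl_cons]
    set curr := (n - b - 1) * PySem.List.pyGetD s (b - 1) 0 with hcurr
    have hmem' : ∀ b' ∈ bs, 1 ≤ b' ∧ b' ≤ n - 3 :=
      fun b' hb' => hmem b' (List.mem_cons_of_mem _ hb')
    have hc1 : (n : Int) - 1 = (((n-1).toNat : Nat) : Int) := by omega
    by_cases hc : curr > PySem.List.pyGetD s (n - 1) 0
    · rw [if_pos hc]
      set s' := PySem.List.pySetD s (n - 1) curr with hs'
      have hlen' : (n-1).toNat < s'.length := by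
        rw [hs', PySem.List.pySetD_of_nonneg _ _ (by omega), List.length_set]; exact hlen
      rw [ih s' hlen' hmem']
      have hget' : ∀ acc : Int, ∀ b' ∈ bs,
          max acc ((n - b' - 1) * PySem.List.pyGetD s' (b' - 1) 0)
          = max acc ((n - b' - 1) * PySem.List.pyGetD s (b' - 1) 0) := by
        intro acc b' hb'
        obtain ⟨h1, h2⟩ := hmem' b' hb'
        have hb'c : (b' : Int) - 1 = (((b'-1).toNat : Nat) : Int) := by omega
        rw [hs', hc1, hb'c, PySem.List.pyGetD_pySetD_natCast s _ _ _ _ hlen,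
            if_neg (by omega)]
      have hgetn : PySem.List.pyGetD s' ((n:Int) - 1) 0 = curr := by
        rw [hs', hc1, PySem.List.pyGetD_pySetD_natCast s _ _ _ _ hlen, if_pos rfl]
      rw [PySem.List.foldl_congr_mem
            (g := fun acc b' => max acc ((n - b' - 1) * PySem.List.pyGetD s (b' - 1) 0))
            _ _ _ hget', hgetn]
      simp only [hs', PySem.List.pySetD_of_nonneg _ _ (show (0:Int) ≤ n - 1 by omega),
        List.set_set]
      rw [max_eq_right (le_of_lt hc)]
    · rw [if_neg hc]
      rw [ih s hlen hmem', max_eq_left (not_lt.mp hc)]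

-- one outer iteration on a correct prefix
theorem A_step (L : Nat) (n : Int) (h7 : 7 ≤ n) (hL : n ≤ (L : Int)) :
    (PySem.List.pyRange (n - 3) 0 (-1)).foldl
      (fun s b =>
        let curr := (n - b - 1) * PySem.List.pyGetD s (b - 1) 0
        if curr > PySem.List.pyGetD s (n - 1) 0 then PySem.List.pySetD s (n - 1) curr
        else s)
      (PySem.List.pySetD (mkScreen L (n.toNat - 1)) (n - 1) 0)
    = mkScreen L n.toNat := by
  rw [pySetD_mkScreen_zero L n.toNat (n-1) (by omega) (by omega) (by omega)]
  have hmem : ∀ b ∈ PySem.List.pyRange (n - 3) 0 (-1), 1 ≤ b ∧ b ≤ n - 3 := by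
    intro b hb
    rw [PySem.List.mem_pyRange_neg_one] at hb
    omega
  rw [inner_fold n (by omega) _ _ (by rw [mkScreen_length]; omega) hmem]
  have hread : ∀ acc : Int, ∀ b ∈ PySem.List.pyRange (n - 3) 0 (-1),
      max acc ((n - b - 1) * PySem.List.pyGetD (mkScreen L (n.toNat - 1)) (b - 1) 0)
      = max acc ((n - b - 1) * F b.toNat) := by
    intro acc b hb
    obtain ⟨h1, h2⟩ := hmem b hb
    rw [pyGetD_mkScreen L (n.toNat - 1) (b-1) (by omega) (by omega),
        if_pos (by omega), show (b-1).toNat + 1 = b.toNat by omega]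
  have hinit : PySem.List.pyGetD (mkScreen L (n.toNat - 1)) ((n:Int) - 1) 0 = 0 := by
    rw [pyGetD_mkScreen L (n.toNat - 1) (n-1) (by omega) (by omega), if_neg (by omega)]
  rw [PySem.List.foldl_congr_mem
        (g := fun acc b => max acc ((n - b - 1) * F b.toNat)) _ _ _ hread, hinit]
  have hM : (PySem.List.pyRange (n - 3) 0 (-1)).foldl
      (fun acc b => max acc ((n - b - 1) * F b.toNat)) 0 = F n.toNat := by
    apply le_antisymm
    · apply foldl_max_le
      · exact F_nonneg _
      · intro b hb
        obtain ⟨h1, h2⟩ := hmem b hb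
        have hmain := F_main n.toNat (by omega) b.toNat (by omega) (by omega)
        rw [show ((n.toNat : Int) - b.toNat - 1) = n - b - 1 by omega] at hmain
        exact hmain
    · have hbounds := PySem.List.le_foldl_max_int (PySem.List.pyRange (n - 3) 0 (-1))
        (fun b => (n - b - 1) * F b.toNat) 0
      have h4 := hbounds.2 (n - 4) (by rw [PySem.List.mem_pyRange_neg_one]; omega)
      have h5 := hbounds.2 (n - 5) (by rw [PySem.List.mem_pyRange_neg_one]; omega)
      simp only at h4 h5
      rw [show (n - (n-4) - 1) = 3 by ring, show (n-4).toNat = n.toNat - 4 by omega] at h4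
      rw [show (n - (n-5) - 1) = 4 by ring, show (n-5).toNat = n.toNat - 5 by omega] at h5
      rw [F_rec n.toNat (by omega)]
      exact max_le h4 h5
  rw [hM]
  exact pySetD_mkScreen_succ L n.toNat (n-1) (by omega) (by omega) (by omega) (by omega)

theorem A_init (L : Nat) (_hL : 7 ≤ L) :
    (PySem.List.pyRange 1 7 1).foldl (fun s n => PySem.List.pySetD s (n - 1) n)
      (List.replicate L (0 : Int)) = mkScreen L 6 := by
  rw [show PySem.List.pyRange 1 7 1 = [1,2,3,4,5,6] from by decide]
  simp only [List.foldl_cons, List.foldl_nil]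
  norm_num [PySem.List.pySetD_of_nonneg]
  apply List.ext_getElem (by simp [mkScreen])
  intro j hj1 hj2
  simp only [List.getElem_set, List.getElem_replicate, mkScreen, List.getElem_map,
    List.getElem_range]
  by_cases hj : j < 6
  · interval_cases j <;> decide
  · rw [if_neg (by omega)]
    split_ifs <;> omega

theorem A_outer (L : Nat) (_hL : 7 ≤ L) (m : Int) (h6 : 6 ≤ m) (hm : m ≤ (L : Int)) :
    (PySem.List.pyRange 7 (m + 1) 1).foldl
      (fun s n =>
        let s := PySem.List.pySetD s (n - 1) 0
        (PySem.List.pyRange (n - 3) 0 (-1)).foldl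
          (fun s b =>
            let curr := (n - b - 1) * PySem.List.pyGetD s (b - 1) 0
            if curr > PySem.List.pyGetD s (n - 1) 0 then PySem.List.pySetD s (n - 1) curr
            else s)
          s)
      (mkScreen L 6) = mkScreen L m.toNat := by
  induction m, h6 using Int.le_induction with
  | base => rw [PySem.List.pyRange_one_eq_nil (by omega)]; rfl
  | succ p hp ih =>
    rw [show p + 1 + 1 = (p + 1) + 1 from rfl,
        PySem.List.pyRange_one_succ_right (by omega), List.foldl_append,
        ih (by omega)]
    simp only [List.foldl_cons, List.foldl_nil]
    have hstep := A_step L (p+1) (by omega) (by omega)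
    rw [show (p+1).toNat - 1 = p.toNat by omega] at hstep
    exact hstep

theorem A_eq_F (N : Int) (h : ¬ N < 7) : findOptimal N = F N.toNat := by
  unfold findOptimal
  rw [if_neg h]
  dsimp only
  rw [A_init N.toNat (by omega), A_outer N.toNat (by omega) N (by omega) (by omega),
      pyGetD_mkScreen N.toNat N.toNat (N-1) (by omega) (by omega), if_pos (by omega),
      show (N-1).toNat + 1 = N.toNat by omega]

-- ===== VERDICT (by name: the statement is the Claim_ definition above) =====
theorem findOptimal_spec : Claim_equal_findOptimal := by
  intro N _
  unfold Spec_findOptimal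
  by_cases h : N < 7
  · simp [findOptimal, findOptimal_alt, h]
  · rw [A_eq_F N h, B_eq_F N h]
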